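-- pv_equiv track=rewrite | github.com/yenjennifer/leetcode | python/2442.py | countDistinctIntegers
-- ===== SOURCE A (Python) =====
-- def countDistinctIntegers(nums):
--     nums1 = nums.copy()
--     for i in nums:
--         reversed_num = 0
--         while i != 0:
--             current_digit = i % 10 #取餘數
--             reversed_num *= 10 #進位
--             reversed_num += current_digit
--             i = i//10
--         nums1.append(reversed_num)
--     return len(set(nums1))
-- ===== SOURCE B (Python) =====
-- def countDistinctIntegers(nums):
--     def rev(x):
--         ds = []
--         while x:
--             ds.append(x % 10)
--             x //= 10
--         return sum(d * 10 ** (len(ds) - 1 - i) for i, d in enumerate(ds))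
--     return len({y for x in nums for y in (x, rev(x))})
-- ===== Notes on version B (the rewrite author's own statement) =====
-- stated objective: alternative
-- what changed: B builds the distinct set in a single comprehension over (x, rev(x)) pairs and computes each reversal as a positional-weight sum over the extracted digit list, instead of A's copy/append/set scaffolding and Horner-style multiply-accumulate while-loop.
import Mathlib
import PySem

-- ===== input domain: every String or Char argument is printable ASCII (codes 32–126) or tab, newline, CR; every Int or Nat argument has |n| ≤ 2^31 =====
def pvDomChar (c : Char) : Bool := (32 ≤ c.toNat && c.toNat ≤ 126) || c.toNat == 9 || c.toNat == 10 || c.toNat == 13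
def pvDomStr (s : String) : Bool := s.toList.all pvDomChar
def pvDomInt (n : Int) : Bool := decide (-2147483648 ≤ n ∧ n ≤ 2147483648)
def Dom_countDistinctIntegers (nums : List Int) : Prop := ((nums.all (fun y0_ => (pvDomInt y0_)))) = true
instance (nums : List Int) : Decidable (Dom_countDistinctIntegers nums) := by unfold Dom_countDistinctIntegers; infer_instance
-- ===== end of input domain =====

-- B builds the distinct set in a single comprehension over (x, rev(x)) and computes each
-- reversal as a positional-weight sum over the extracted digit list, replacing A's
-- copy/append/set scaffolding and Horner-style accumulator loop (alternative structure, same cost).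

-- ===== PORT A =====
-- A's while loop; the fuel i.natAbs+1 suffices for every i ≥ 0 (each step divides i by 10).
-- On a negative i the Python loop never terminates (i//10 stalls at -1): outside Pre_.
def pvRevLoopA : Nat → Int → Int → Int
  | 0, _, rev => rev
  | f+1, i, rev =>
      if i ≠ 0 then pvRevLoopA f (PySem.Int.floordiv i 10) (rev * 10 + PySem.Int.mod i 10)
      else rev

def countDistinctIntegers (nums : List Int) : Int :=
  let nums1 := nums.foldl (fun acc i => acc ++ [pvRevLoopA (i.natAbs + 1) i 0]) nums
  PySem.Set.len (PySem.Set.ofList nums1)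

-- ===== PORT B =====
-- B's digit-extraction while loop; same fuel remark as for A (negative x is outside Pre_).
def pvDigitsB : Nat → Int → List Int → List Int
  | 0, _, ds => ds
  | f+1, x, ds =>
      if x ≠ 0 then pvDigitsB f (PySem.Int.floordiv x 10) (ds ++ [PySem.Int.mod x 10])
      else ds

def pvRevB (x : Int) : Int :=
  let ds := pvDigitsB (x.natAbs + 1) x []
  ((PySem.List.enumerate ds).map (fun p => p.2 * 10 ^ (ds.length - 1 - p.1.toNat))).sum

def countDistinctIntegers_alt (nums : List Int) : Int :=
  PySem.Set.len (PySem.Set.ofList (nums.flatMap (fun x => [x, pvRevB x])))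

-- ===== PRECONDITION & SPEC =====
-- Pre_ excludes lists containing a negative integer: on those inputs the Python A never
-- returns (its while loop diverges, since i//10 stalls at -1), and Python B diverges too.
def Pre_countDistinctIntegers (nums : List Int) : Prop := ∀ x ∈ nums, 0 ≤ x
instance (nums : List Int) : Decidable (Pre_countDistinctIntegers nums) := by
  unfold Pre_countDistinctIntegers; infer_instance

def pvWitness_countDistinctIntegers : List Int := [1, 13, 10, 0, 100, 13]

def Spec_countDistinctIntegers (nums : List Int) (out : Int) : Prop := out = countDistinctIntegers_alt nums
instance (nums : List Int) (out : Int) : Decidable (Spec_countDistinctIntegers nums out) := by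
  unfold Spec_countDistinctIntegers; infer_instance

-- ===== CLAIM (what is proved, stated in full; the proofs are below) =====
def Claim_equal_countDistinctIntegers : Prop := ∀ (nums : List Int), Dom_countDistinctIntegers nums → Pre_countDistinctIntegers nums → Spec_countDistinctIntegers nums (countDistinctIntegers nums)

-- ===== LEMMAS AND PROOFS =====

-- LSB-first decimal digit list of a natural number (specification-level).
def pvDigitsN (n : Nat) : List Int :=
  if h : n = 0 then [] else ((n % 10 : Nat) : Int) :: pvDigitsN (n / 10)
decreasing_by exact Nat.div_lt_self (Nat.pos_of_ne_zero h) (by omega)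

-- value of an LSB-first digit list read back most-significant-first
def pvS : List Int → Int
  | [] => 0
  | d :: t => d * 10 ^ t.length + pvS t

theorem pvRevLoopA_eq_digits (f : Nat) : ∀ (n : Nat) (acc : Int), n < f →
    pvRevLoopA f (n : Int) acc = (pvDigitsN n).foldl (fun r d => r * 10 + d) acc := by
  induction f with
  | zero => intro n acc h; omega
  | succ f ih =>
      intro n acc h
      by_cases hn : n = 0
      · subst hn; simp [pvRevLoopA, pvDigitsN]
      · have hcast : (10 : Int) = ((10 : Nat) : Int) := rfl
        rw [pvDigitsN]
        simp only [hn, dite_false, pvRevLoopA, List.foldl_cons]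
        rw [if_pos (by exact_mod_cast hn), hcast, PySem.Int.floordiv_natCast,
          PySem.Int.mod_natCast, ih (n / 10) _ (by omega)]
        norm_cast

theorem pvDigitsB_eq_digits (f : Nat) : ∀ (n : Nat) (ds : List Int), n < f →
    pvDigitsB f (n : Int) ds = ds ++ pvDigitsN n := by
  induction f with
  | zero => intro n ds h; omega
  | succ f ih =>
      intro n ds h
      by_cases hn : n = 0
      · subst hn; simp [pvDigitsB, pvDigitsN]
      · have hcast : (10 : Int) = ((10 : Nat) : Int) := rfl
        rw [pvDigitsN]
        simp only [hn, dite_false, pvDigitsB]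
        rw [if_pos (by exact_mod_cast hn), hcast, PySem.Int.floordiv_natCast,
          PySem.Int.mod_natCast, ih (n / 10) _ (by omega)]
        simp

theorem foldl_horner_eq (L : List Int) : ∀ acc : Int,
    L.foldl (fun r d => r * 10 + d) acc = acc * 10 ^ L.length + pvS L := by
  induction L with
  | nil => intro acc; simp [pvS]
  | cons d t ih =>
      intro acc
      simp only [List.foldl_cons, List.length_cons, pvS, ih]
      ring

theorem enumerate_weight_sum (L : List Int) : ∀ (s n : Nat), s + L.length = n →
    ((PySem.List.enumerate L (s : Int)).map
      (fun p => p.2 * 10 ^ (n - 1 - p.1.toNat))).sum = pvS L := by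
  induction L with
  | nil => intro s n _; simp [PySem.List.enumerate_nil, pvS]
  | cons d t ih =>
      intro s n h
      rw [PySem.List.enumerate_cons]
      simp only [List.map_cons, List.sum_cons, pvS]
      have h1 : ((s : Int) + 1) = ((s + 1 : Nat) : Int) := by push_cast; ring
      have h2 : ((s : Int)).toNat = s := Int.toNat_natCast s
      rw [h1, ih (s + 1) n (by simp at h ⊢; omega), h2]
      have : n - 1 - s = t.length := by simp at h; omega
      rw [this]

theorem rev_eq (x : Int) (hx : 0 ≤ x) : pvRevLoopA (x.natAbs + 1) x 0 = pvRevB x := by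
  obtain ⟨n, rfl⟩ := Int.eq_ofNat_of_zero_le hx
  have hd : pvDigitsB (n + 1) (n : Int) [] = pvDigitsN n :=
    pvDigitsB_eq_digits (n + 1) n [] (by omega)
  show pvRevLoopA (n + 1) (n : Int) 0 = pvRevB (n : Int)
  rw [pvRevLoopA_eq_digits (n + 1) n 0 (by omega), foldl_horner_eq]
  simp only [pvRevB, Int.natAbs_natCast, hd]
  rw [show PySem.List.enumerate (pvDigitsN n) = PySem.List.enumerate (pvDigitsN n) ((0 : Nat) : Int) from rfl,
    enumerate_weight_sum (pvDigitsN n) 0 (pvDigitsN n).length (by omega)]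
  ring

theorem mem_iff_lists (nums : List Int) (hpre : ∀ x ∈ nums, 0 ≤ x) (y : Int) :
    y ∈ nums ++ nums.map (fun i => pvRevLoopA (i.natAbs + 1) i 0) ↔
    y ∈ nums.flatMap (fun x => [x, pvRevB x]) := by
  simp only [List.mem_append, List.mem_map, List.mem_flatMap, List.mem_cons,
    List.not_mem_nil, or_false]
  constructor
  · rintro (hy | ⟨x, hx, rfl⟩)
    · exact ⟨y, hy, Or.inl rfl⟩
    · exact ⟨x, hx, Or.inr (rev_eq x (hpre x hx))⟩
  · rintro ⟨x, hx, rfl | rfl⟩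
    · exact Or.inl hx
    · exact Or.inr ⟨x, hx, rev_eq x (hpre x hx)⟩

-- ===== VERDICT (by name: the statement is the Claim_ definition above) =====
theorem countDistinctIntegers_spec : Claim_equal_countDistinctIntegers := by
  intro nums _ hpre
  unfold Spec_countDistinctIntegers countDistinctIntegers countDistinctIntegers_alt
  simp only [PySem.List.foldl_append_singleton_eq_map]
  have hperm :
      (PySem.Set.ofList (nums ++ nums.map (fun i => pvRevLoopA (i.natAbs + 1) i 0))).Perm
        (PySem.Set.ofList (nums.flatMap (fun x => [x, pvRevB x]))) := by
    rw [List.perm_ext_iff_of_nodup (PySem.Set.nodup_ofList _) (PySem.Set.nodup_ofList _)]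
    intro a
    rw [PySem.Set.mem_ofList, PySem.Set.mem_ofList]
    exact mem_iff_lists nums hpre a
  simp only [PySem.Set.len, hperm.length_eq]
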